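-- pv_equiv track=rewrite | github.com/sakshibm747/tourism_02 | tourism_02/app.py | _parse_food_trail_form
-- ===== SOURCE A (Python) =====
-- def _normalize_food_type(value):
--     label = str(value or '').strip().lower()
--     if label in ('veg', 'vegetarian', 'v'):
--         return 'veg'
--     if label in ('non-veg', 'non veg', 'nonveg', 'nv', 'non vegetarian', 'non-vegetarian'):
--         return 'non-veg'
--     return 'veg'
--
-- def _normalize_food_trail(food_items):
--     if isinstance(food_items, dict):
--         food_items = [food_items]
--     if not isinstance(food_items, list):
--         return []
--
--     cleaned_items = []
--     seen = set()
--     for item in food_items: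
--         if isinstance(item, str):
--             dish_name = item.strip()
--             dish_type = 'veg'
--             dish_note = ''
--         elif isinstance(item, dict):
--             dish_name = str(item.get('name', '')).strip()
--             dish_type = _normalize_food_type(item.get('type', 'veg'))
--             dish_note = str(item.get('note', '')).strip()
--         else:
--             continue
--
--         if not dish_name:
--             continue
--
--         key = f"{dish_name.lower()}::{dish_type}"
--         if key in seen:
--             continue
--
--         cleaned_items.append({'name': dish_name, 'type': dish_type, 'note': dish_note})
--         seen.add(key)
--
--         if len(cleaned_items) >= 8:
--             break
--
--     return cleaned_items
--
-- def _parse_food_trail_form(raw_text):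
--     """Parse dashboard textarea lines into food trail objects.
--
--     Expected line format:
--     Dish Name | veg/non-veg | short note
--     """
--     text = str(raw_text or '').strip()
--     if not text:
--         return []
--
--     items = []
--     for line in text.splitlines():
--         row = line.strip()
--         if not row:
--             continue
--
--         if '|' in row:
--             parts = [p.strip() for p in row.split('|', 2)]
--         elif ',' in row:
--             parts = [p.strip() for p in row.split(',', 2)]
--         else:
--             parts = [row, 'veg', '']
--
--         dish_name = parts[0] if len(parts) >= 1 else ''
--         dish_type = parts[1] if len(parts) >= 2 else 'veg'
--         dish_note = parts[2] if len(parts) >= 3 else ''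
--
--         if dish_name:
--             items.append({'name': dish_name, 'type': dish_type, 'note': dish_note})
--
--     return _normalize_food_trail(items)
-- ===== SOURCE B (Python) =====
-- def _parse_food_trail_form(raw_text):
--     """Single fused pass: parse each line and normalize it immediately,
--     deduplicating on the fly and stopping at 8 accepted items."""
--     items = []
--     seen = set()
--     for line in str(raw_text or '').strip().splitlines():
--         row = line.strip()
--         if not row:
--             continue
--         if '|' in row:
--             parts = [p.strip() for p in row.split('|', 2)]
--         elif ',' in row:
--             parts = [p.strip() for p in row.split(',', 2)]
--         else:
--             parts = [row, 'veg', '']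
--         name = parts[0]
--         if not name:
--             continue
--         raw_type = (parts[1] if len(parts) >= 2 else 'veg').lower()
--         if raw_type in ('veg', 'vegetarian', 'v'):
--             ftype = 'veg'
--         elif raw_type in ('non-veg', 'non veg', 'nonveg', 'nv', 'non vegetarian', 'non-vegetarian'):
--             ftype = 'non-veg'
--         else:
--             ftype = 'veg'
--         note = parts[2] if len(parts) >= 3 else ''
--         key = name.lower() + '::' + ftype
--         if key in seen:
--             continue
--         items.append({'name': name, 'type': ftype, 'note': note})
--         seen.add(key)
--         if len(items) >= 8:
--             break
--     return items
-- ===== Notes on version B (the rewrite author's own statement) =====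
-- stated objective: simpler
-- what changed: A parses all lines into intermediate dicts and then runs a second normalization/dedup pass over them; B is a single fused pass over the lines that normalizes, dedups and caps at 8 items on the fly, terminating early once 8 items are accepted.
import Mathlib
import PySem

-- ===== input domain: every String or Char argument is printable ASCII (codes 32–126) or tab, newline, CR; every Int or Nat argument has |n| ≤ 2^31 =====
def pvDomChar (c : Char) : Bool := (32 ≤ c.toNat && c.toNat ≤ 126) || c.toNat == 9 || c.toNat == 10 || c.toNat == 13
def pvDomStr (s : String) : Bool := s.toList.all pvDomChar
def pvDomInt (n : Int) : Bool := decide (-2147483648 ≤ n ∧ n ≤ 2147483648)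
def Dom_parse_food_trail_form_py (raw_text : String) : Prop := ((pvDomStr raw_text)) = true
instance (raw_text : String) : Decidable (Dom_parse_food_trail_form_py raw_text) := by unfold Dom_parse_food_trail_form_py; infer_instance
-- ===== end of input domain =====

-- B fuses A's parse pass and normalize pass into one early-terminating pass (objective: simpler decomposition, same result).

-- ===== PORT A =====
-- helper _normalize_food_type; `str(value or '')` is the identity for the strings reaching it
def normalize_food_type_py (value : List Char) : List Char :=
  let label := PySem.Chars.lower (PySem.Chars.strip value)
  if ["veg".toList, "vegetarian".toList, "v".toList].contains label then "veg".toList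
  else if ["non-veg".toList, "non veg".toList, "nonveg".toList, "nv".toList,
           "non vegetarian".toList, "non-vegetarian".toList].contains label then "non-veg".toList
  else "veg".toList

-- the for-loop of _normalize_food_trail (items are always the parse pass's dicts, so the
-- isinstance(str)/else branches of the Python never fire for this call; each dict is the
-- record (name, type, note) and `.get` reads the stored field); `break` = return cleaned'
def normalize_food_trail_loop_py :
    List (List Char × List Char × List Char) → List (List (String × String)) →
    PySem.Set (List Char) → List (List (String × String))
  | [], cleaned, _ => cleaned
  | item :: rest, cleaned, seen =>
    let dish_name := PySem.Chars.strip item.1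
    let dish_type := normalize_food_type_py item.2.1
    let dish_note := PySem.Chars.strip item.2.2
    if dish_name = [] then normalize_food_trail_loop_py rest cleaned seen
    else
      let key := PySem.Chars.lower dish_name ++ "::".toList ++ dish_type
      if seen.contains key then normalize_food_trail_loop_py rest cleaned seen
      else
        let cleaned' := cleaned ++
          [[("name", String.ofList dish_name), ("type", String.ofList dish_type), ("note", String.ofList dish_note)]]
        if 8 ≤ cleaned'.length then cleaned'
        else normalize_food_trail_loop_py rest cleaned' (seen.add key)

def normalize_food_trail_py (food_items : List (List Char × List Char × List Char)) :
    List (List (String × String)) :=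
  normalize_food_trail_loop_py food_items [] PySem.Set.empty

def parse_food_trail_form_py (raw_text : String) : List (List (String × String)) :=
  let text := PySem.Chars.strip raw_text.toList   -- str(raw_text or '').strip()
  if text = [] then []
  else
    let items := (PySem.Chars.splitlines text).foldl (fun items line =>
      let row := PySem.Chars.strip line
      if row = [] then items
      else
        let parts :=
          if PySem.Chars.isIn "|".toList row then
            (PySem.Chars.splitOnMax row "|".toList 2).map PySem.Chars.strip
          else if PySem.Chars.isIn ",".toList row then
            (PySem.Chars.splitOnMax row ",".toList 2).map PySem.Chars.strip
          else [row, "veg".toList, []]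
        let dish_name := if 1 ≤ parts.length then PySem.List.pyGetD parts 0 [] else []
        let dish_type := if 2 ≤ parts.length then PySem.List.pyGetD parts 1 [] else "veg".toList
        let dish_note := if 3 ≤ parts.length then PySem.List.pyGetD parts 2 [] else []
        if dish_name ≠ [] then items ++ [(dish_name, dish_type, dish_note)] else items) []
    normalize_food_trail_py items

-- ===== PORT B =====
-- Source B's single fused loop; `break` = return items'
def parse_food_trail_form_fused :
    List (List Char) → List (List (String × String)) → PySem.Set (List Char) →
    List (List (String × String))
  | [], items, _ => items
  | line :: rest, items, seen =>
    let row := PySem.Chars.strip line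
    if row = [] then parse_food_trail_form_fused rest items seen
    else
      let parts :=
        if PySem.Chars.isIn "|".toList row then
          (PySem.Chars.splitOnMax row "|".toList 2).map PySem.Chars.strip
        else if PySem.Chars.isIn ",".toList row then
          (PySem.Chars.splitOnMax row ",".toList 2).map PySem.Chars.strip
        else [row, "veg".toList, []]
      let name := PySem.List.pyGetD parts 0 []
      if name = [] then parse_food_trail_form_fused rest items seen
      else
        let raw_type :=
          PySem.Chars.lower (if 2 ≤ parts.length then PySem.List.pyGetD parts 1 [] else "veg".toList)
        let ftype :=
          if ["veg".toList, "vegetarian".toList, "v".toList].contains raw_type then "veg".toList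
          else if ["non-veg".toList, "non veg".toList, "nonveg".toList, "nv".toList,
                   "non vegetarian".toList, "non-vegetarian".toList].contains raw_type then "non-veg".toList
          else "veg".toList
        let note := if 3 ≤ parts.length then PySem.List.pyGetD parts 2 [] else []
        let key := PySem.Chars.lower name ++ "::".toList ++ ftype
        if seen.contains key then parse_food_trail_form_fused rest items seen
        else
          let items' := items ++
            [[("name", String.ofList name), ("type", String.ofList ftype), ("note", String.ofList note)]]
          if 8 ≤ items'.length then items'
          else parse_food_trail_form_fused rest items' (seen.add key)

def parse_food_trail_form_py_alt (raw_text : String) : List (List (String × String)) :=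
  parse_food_trail_form_fused
    (PySem.Chars.splitlines (PySem.Chars.strip raw_text.toList)) [] PySem.Set.empty

-- ===== PRECONDITION & SPEC =====
def Spec_parse_food_trail_form_py (raw_text : String) (out : List (List (String × String))) : Prop := out = parse_food_trail_form_py_alt raw_text
instance (raw_text : String) (out : List (List (String × String))) : Decidable (Spec_parse_food_trail_form_py raw_text out) := by unfold Spec_parse_food_trail_form_py; infer_instance

-- ===== CLAIM (what is proved, stated in full; the proofs are below) =====
def Claim_equal_parse_food_trail_form_py : Prop := ∀ (raw_text : String), Dom_parse_food_trail_form_py raw_text → Spec_parse_food_trail_form_py raw_text (parse_food_trail_form_py raw_text)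

-- ===== LEMMAS AND PROOFS =====

-- what A's parse loop contributes for one line
def pvParseLine (line : List Char) : List (List Char × List Char × List Char) :=
  let row := PySem.Chars.strip line
  if row = [] then []
  else
    let parts :=
      if PySem.Chars.isIn "|".toList row then
        (PySem.Chars.splitOnMax row "|".toList 2).map PySem.Chars.strip
      else if PySem.Chars.isIn ",".toList row then
        (PySem.Chars.splitOnMax row ",".toList 2).map PySem.Chars.strip
      else [row, "veg".toList, []]
    let dish_name := if 1 ≤ parts.length then PySem.List.pyGetD parts 0 [] else []
    let dish_type := if 2 ≤ parts.length then PySem.List.pyGetD parts 1 [] else "veg".toList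
    let dish_note := if 3 ≤ parts.length then PySem.List.pyGetD parts 2 [] else []
    if dish_name ≠ [] then [(dish_name, dish_type, dish_note)] else []

theorem pvFoldlA_eq (lines : List (List Char)) (acc : List (List Char × List Char × List Char)) :
    lines.foldl (fun items line =>
      let row := PySem.Chars.strip line
      if row = [] then items
      else
        let parts :=
          if PySem.Chars.isIn "|".toList row then
            (PySem.Chars.splitOnMax row "|".toList 2).map PySem.Chars.strip
          else if PySem.Chars.isIn ",".toList row then
            (PySem.Chars.splitOnMax row ",".toList 2).map PySem.Chars.strip
          else [row, "veg".toList, []]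
        let dish_name := if 1 ≤ parts.length then PySem.List.pyGetD parts 0 [] else []
        let dish_type := if 2 ≤ parts.length then PySem.List.pyGetD parts 1 [] else "veg".toList
        let dish_note := if 3 ≤ parts.length then PySem.List.pyGetD parts 2 [] else []
        if dish_name ≠ [] then items ++ [(dish_name, dish_type, dish_note)] else items) acc
    = acc ++ lines.flatMap pvParseLine := by
  have h : (fun (items : List (List Char × List Char × List Char)) line =>
      let row := PySem.Chars.strip line
      if row = [] then items
      else
        let parts :=
          if PySem.Chars.isIn "|".toList row then
            (PySem.Chars.splitOnMax row "|".toList 2).map PySem.Chars.strip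
          else if PySem.Chars.isIn ",".toList row then
            (PySem.Chars.splitOnMax row ",".toList 2).map PySem.Chars.strip
          else [row, "veg".toList, []]
        let dish_name := if 1 ≤ parts.length then PySem.List.pyGetD parts 0 [] else []
        let dish_type := if 2 ≤ parts.length then PySem.List.pyGetD parts 1 [] else "veg".toList
        let dish_note := if 3 ≤ parts.length then PySem.List.pyGetD parts 2 [] else []
        if dish_name ≠ [] then items ++ [(dish_name, dish_type, dish_note)] else items)
      = (fun items line => items ++ pvParseLine line) := by
    funext items line
    simp only [pvParseLine]
    split_ifs <;> simp
  rw [h, PySem.List.foldl_append_eq_flatMap]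

theorem pvRstrip_idem (s : List Char) : PySem.Chars.rstrip (PySem.Chars.rstrip s) = PySem.Chars.rstrip s := by
  simp [PySem.Chars.rstrip, List.dropWhile_idempotent]

theorem pvLstrip_rstrip_lstrip (s : List Char) :
    PySem.Chars.lstrip (PySem.Chars.rstrip (PySem.Chars.lstrip s)) = PySem.Chars.rstrip (PySem.Chars.lstrip s) := by
  simp only [PySem.Chars.lstrip, PySem.Chars.rstrip]
  set u := List.dropWhile PySem.Chars.isspace s with hu
  have hpre : (List.dropWhile PySem.Chars.isspace u.reverse).reverse <+: u := by
    have h1 : List.dropWhile PySem.Chars.isspace u.reverse <:+ u.reverse :=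
      List.dropWhile_suffix _
    have h2 := (List.reverse_prefix (l₁ := List.dropWhile PySem.Chars.isspace u.reverse)
      (l₂ := u.reverse)).mpr h1
    simpa using h2
  cases hr : (List.dropWhile PySem.Chars.isspace u.reverse).reverse with
  | nil => simp
  | cons a w =>
    rw [hr] at hpre
    obtain ⟨t, ht⟩ := hpre
    have ha : PySem.Chars.isspace a = false := by
      have hh := List.head?_dropWhile_not PySem.Chars.isspace s
      rw [← hu, ← ht] at hh
      simpa using hh
    simp [List.dropWhile_cons_of_neg, ha]

theorem pvStrip_idem (s : List Char) : PySem.Chars.strip (PySem.Chars.strip s) = PySem.Chars.strip s := by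
  simp only [PySem.Chars.strip]
  rw [pvLstrip_rstrip_lstrip, pvRstrip_idem]

theorem pvGetD0 (parts : List (List Char)) :
    (if 1 ≤ parts.length then PySem.List.pyGetD parts 0 [] else ([] : List Char)) =
      PySem.List.pyGetD parts 0 [] := by
  cases parts <;> simp [PySem.List.pyGetD, PySem.List.pyGet?]

theorem pvStrip_pyGetD (P : List (List Char)) (i : Int)
    (h : ∀ x ∈ P, PySem.Chars.strip x = x) :
    PySem.Chars.strip (PySem.List.pyGetD P i []) = PySem.List.pyGetD P i [] := by
  unfold PySem.List.pyGetD
  cases hg : PySem.List.pyGet? P i with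
  | none => rfl
  | some x => simpa using h x (PySem.List.mem_of_pyGet?_eq_some P hg)

-- the fusion lemma: normalizing A's parsed items = B's fused loop
theorem pvFusion (lines : List (List Char)) (cleaned : List (List (String × String)))
    (seen : PySem.Set (List Char)) :
    normalize_food_trail_loop_py (lines.flatMap pvParseLine) cleaned seen
      = parse_food_trail_form_fused lines cleaned seen := by
  induction lines generalizing cleaned seen with
  | nil => rfl
  | cons line rest ih =>
    rw [List.flatMap_cons]
    by_cases hrow : PySem.Chars.strip line = []
    · have hpl : pvParseLine line = [] := by simp [pvParseLine, hrow]
      rw [hpl, List.nil_append]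
      rw [parse_food_trail_form_fused]
      simp only [hrow]
      exact ih _ _
    · simp only [pvParseLine, parse_food_trail_form_fused]
      rw [if_neg hrow, if_neg hrow]
      set r := PySem.Chars.strip line with hrdef
      set P := (if PySem.Chars.isIn "|".toList r = true then
          List.map PySem.Chars.strip (PySem.Chars.splitOnMax r "|".toList 2)
        else if PySem.Chars.isIn ",".toList r = true then
          List.map PySem.Chars.strip (PySem.Chars.splitOnMax r ",".toList 2)
        else [r, "veg".toList, []]) with hPdef
      have hPstripped : ∀ x ∈ P, PySem.Chars.strip x = x := by
        rw [hPdef]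
        split_ifs with h1 h2
        · intro x hx
          obtain ⟨y, _, rfl⟩ := List.mem_map.mp hx
          exact pvStrip_idem y
        · intro x hx
          obtain ⟨y, _, rfl⟩ := List.mem_map.mp hx
          exact pvStrip_idem y
        · intro x hx
          rcases List.mem_cons.mp hx with h | hx
          · rw [h, hrdef]; exact pvStrip_idem line
          · rcases List.mem_cons.mp hx with h | hx
            · rw [h]; decide
            · simp at hx; rw [hx]; rfl
      rw [pvGetD0 P]
      have hn' := pvStrip_pyGetD P 0 hPstripped
      have ht' : PySem.Chars.strip
          (if 2 ≤ P.length then PySem.List.pyGetD P 1 [] else "veg".toList) =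
          (if 2 ≤ P.length then PySem.List.pyGetD P 1 [] else "veg".toList) := by
        split_ifs
        · exact pvStrip_pyGetD P 1 hPstripped
        · decide
      have hm' : PySem.Chars.strip
          (if 3 ≤ P.length then PySem.List.pyGetD P 2 [] else []) =
          (if 3 ≤ P.length then PySem.List.pyGetD P 2 [] else []) := by
        split_ifs
        · exact pvStrip_pyGetD P 2 hPstripped
        · rfl
      by_cases hn : PySem.List.pyGetD P 0 [] = []
      · simp only [hn, ne_eq, not_true_eq_false, if_false, List.nil_append]
        exact ih _ _
      · rw [if_pos (by simpa using hn), if_neg hn, List.singleton_append]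
        simp only [normalize_food_trail_loop_py]
        rw [hn', hm']
        rw [if_neg hn]
        simp only [normalize_food_type_py]
        rw [ht']
        split_ifs <;> first | rfl | exact ih _ _

-- ===== VERDICT (by name: the statement is the Claim_ definition above) =====
theorem parse_food_trail_form_py_spec : Claim_equal_parse_food_trail_form_py := by
  intro raw_text _
  unfold Spec_parse_food_trail_form_py
  simp only [parse_food_trail_form_py, parse_food_trail_form_py_alt]
  by_cases h : PySem.Chars.strip raw_text.toList = []
  · rw [h]
    rfl
  · rw [if_neg h]
    unfold normalize_food_trail_py
    rw [pvFoldlA_eq, List.nil_append, pvFusion]
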